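-- pv_equiv track=rewrite | github.com/flowdel/footprint_finder | fp_finder.py | alignment
-- ===== SOURCE A (Python) =====
-- def weight(sc, tc, matrix):
--
--     alphabet = "ATGC-"
--
--     row = alphabet.find(sc)
--     line = alphabet.find(tc)
--
--     return matrix[line][row]
--
-- def dist(i, j, mas, s, t, loc, matrix):
--     d = 0
--     a = mas[i][j-1] + weight('-', t[j-1], matrix)
--     b = mas[i - 1][j] + weight(s[i - 1], '-', matrix)
--     c = mas[i - 1][j - 1] + weight(s[i - 1], t[j - 1], matrix)
--
--     max_value = 0
--     if a > b:
--         max_value = a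
--         loc[i][j] = 1
--     else:
--         max_value = b
--         loc[i][j] = 2
--
--     if c > max_value:
--         max_value = c
--         loc[i][j] = 3
--
--     if d > max_value:
--         max_value = d
--         loc[i][j] = 0
--
--     return max_value
--
-- def alignment(s, t):
--
--     matrix = [[50, 0, 0, 0, -20000],
--               [0, 50, 0, 0, -20000],
--               [0, 0, 50, 0, -20000],
--               [0, 0, 0, 50, -20000],
--               [-20000, -20000, -20000, -20000, -20000]]
--
--     n = len(s) + 1
--     m = len(t) + 1
--
--     value = [[0 for x in range(m)] for y in range(n)]
--     loc = [[0 for x in range(m)] for y in range(n)]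
--
--     for i in range(1, n):
--         loc[i][0] = 2
--
--     for j in range(1, m):
--         loc[0][j] = 1
--
--     for i in range(1, n):
--         for j in range(1, m):
--             value[i][j] = dist(i, j, value, s, t, loc, matrix)
--
--     max_value = 0
--
--     for i in range(0, n):
--         for j in range(0, m):
--             if max_value < value[i][j]:
--                 max_value = value[i][j]
--
--     if max_value < 50*(len(t) - 1):
--         return -1
--     else:
--         return len(t)
-- ===== SOURCE B (Python) =====
-- def alignment(s, t):
--     n, m = len(s), len(t)
--
--     def w(a, b):
--         if a not in "ATGC" or b not in "ATGC":
--             return -20000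
--         return 50 if a == b else 0
--
--     best = 0
--     starts = [(i, 0) for i in range(n)] + [(0, j) for j in range(1, m)]
--     for (i, j) in starts:
--         v = 0
--         for k in range(min(n - i, m - j)):
--             v = max(0, v + w(s[i + k], t[j + k]))
--             if v > best:
--                 best = v
--     return m if best >= 50 * (m - 1) else -1
-- ===== Notes on version B (the rewrite author's own statement) =====
-- stated objective: faster
-- what changed: Replaces the full Smith-Waterman dynamic-programming table (two (n+1)x(m+1) matrices, three candidate moves per cell via a substitution-matrix lookup, plus a separate full-matrix max pass) by a single O(1)-state scan along each diagonal: because the gap penalty (-20000) can never let a gapped alignment reach the 50*(len(t)-1) acceptance threshold, only the gapless diagonal recurrence max(0, v + w) matters, and B computes the running maximum of that recurrence per diagonal with direct character comparisons and no matrices.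
import Mathlib
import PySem

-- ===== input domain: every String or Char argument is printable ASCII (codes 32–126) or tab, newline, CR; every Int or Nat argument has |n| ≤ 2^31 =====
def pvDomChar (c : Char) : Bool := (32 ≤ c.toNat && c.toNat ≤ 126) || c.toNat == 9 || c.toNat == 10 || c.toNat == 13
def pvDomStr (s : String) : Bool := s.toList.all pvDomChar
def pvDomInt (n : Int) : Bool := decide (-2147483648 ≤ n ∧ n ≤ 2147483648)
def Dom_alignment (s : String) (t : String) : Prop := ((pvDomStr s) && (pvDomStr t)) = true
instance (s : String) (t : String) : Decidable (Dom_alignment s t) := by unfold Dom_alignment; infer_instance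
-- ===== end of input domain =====

-- B replaces A's full Smith-Waterman table (whose gap moves can never reach the
-- 50*(len(t)-1) acceptance threshold) by a per-diagonal gapless running-max scan:
-- no matrices, O(n+m) extra space, measurably faster by a constant factor.
-- A's `loc` matrix is write-only with respect to the returned value and is omitted
-- from the port (it never influences `value` nor the result).

-- ===== PORT A =====
def pvMatrix : List (List Int) :=
  [[50, 0, 0, 0, -20000],
   [0, 50, 0, 0, -20000],
   [0, 0, 50, 0, -20000],
   [0, 0, 0, 50, -20000],
   [-20000, -20000, -20000, -20000, -20000]]

-- weight(sc, tc, matrix); Python's 1-char strings are Chars here, `alphabet.find` is Chars.find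
def pvWeight (sc tc : Char) (matrix : List (List Int)) : Int :=
  let alphabet : List Char := ['A', 'T', 'G', 'C', '-']
  let row := PySem.Chars.find alphabet [sc]
  let line := PySem.Chars.find alphabet [tc]
  PySem.List.pyGetD (PySem.List.pyGetD matrix line []) row 0

-- mas[i][j] (indices always in range where used)
def pvGet2 (m : List (List Int)) (i j : Int) : Int :=
  PySem.List.pyGetD (PySem.List.pyGetD m i []) j 0

-- mas[i][j] = v
def pvSet2 (m : List (List Int)) (i j : Int) (v : Int) : List (List Int) :=
  PySem.List.pySetD m i (PySem.List.pySetD (PySem.List.pyGetD m i []) j v)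

-- dist(i, j, mas, s, t, loc, matrix) (loc writes omitted: write-only)
def pvDist (i j : Int) (mas : List (List Int)) (s t : List Char)
    (matrix : List (List Int)) : Int :=
  let d : Int := 0
  let a := pvGet2 mas i (j-1) + pvWeight '-' (PySem.List.pyGetD t (j-1) ' ') matrix
  let b := pvGet2 mas (i-1) j + pvWeight (PySem.List.pyGetD s (i-1) ' ') '-' matrix
  let c := pvGet2 mas (i-1) (j-1) +
            pvWeight (PySem.List.pyGetD s (i-1) ' ') (PySem.List.pyGetD t (j-1) ' ') matrix
  let mv := if a > b then a else b
  let mv2 := if c > mv then c else mv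
  if d > mv2 then d else mv2

def alignment (s : String) (t : String) : Int :=
  let matrix := pvMatrix
  let sL := s.toList
  let tL := t.toList
  let n : Int := PySem.Str.len s + 1
  let m : Int := PySem.Str.len t + 1
  let value := (PySem.List.pyRange 0 n 1).map
    (fun _ => (PySem.List.pyRange 0 m 1).map (fun _ => (0 : Int)))
  let value := (PySem.List.pyRange 1 n 1).foldl (fun value i =>
      (PySem.List.pyRange 1 m 1).foldl (fun value j =>
        pvSet2 value i j (pvDist i j value sL tL matrix)) value) value
  let maxValue := (PySem.List.pyRange 0 n 1).foldl (fun mv i =>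
      (PySem.List.pyRange 0 m 1).foldl (fun mv j =>
        if mv < pvGet2 value i j then pvGet2 value i j else mv) mv) 0
  if maxValue < 50 * (PySem.Str.len t - 1) then -1 else PySem.Str.len t

-- ===== PORT B =====
-- w(a, b) from Source B: `a in "ATGC"` is a 1-char substring test
def pvW (a b : Char) : Int :=
  if ¬ (PySem.Chars.isIn [a] ['A', 'T', 'G', 'C'] = true)
      ∨ ¬ (PySem.Chars.isIn [b] ['A', 'T', 'G', 'C'] = true) then -20000
  else if a = b then 50 else 0

def alignment_alt (s : String) (t : String) : Int :=
  let sL := s.toList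
  let tL := t.toList
  let n := sL.length
  let m := tL.length
  let starts := (List.range n).map (fun i => (i, 0)) ++
                (List.range (m - 1)).map (fun j => (0, j + 1))
  let best := starts.foldl (fun (best : Int) (p : Nat × Nat) =>
    ((List.range (min (n - p.1) (m - p.2))).foldl (fun vb k =>
        let v := max 0 (vb.1 + pvW (sL.getD (p.1 + k) ' ') (tL.getD (p.2 + k) ' '))
        (v, if v > vb.2 then v else vb.2)) ((0 : Int), best)).2) 0
  if best ≥ 50 * ((m : Int) - 1) then (m : Int) else -1

-- ===== PRECONDITION & SPEC =====
def Spec_alignment (s : String) (t : String) (out : Int) : Prop := out = alignment_alt s t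
instance (s : String) (t : String) (out : Int) : Decidable (Spec_alignment s t out) := by unfold Spec_alignment; infer_instance

-- ===== CLAIM (what is proved, stated in full; the proofs are below) =====
def Claim_equal_alignment : Prop := ∀ (s : String) (t : String), Dom_alignment s t → Spec_alignment s t (alignment s t)

-- ===== LEMMAS AND PROOFS =====

-- the DP recurrence that A's table satisfies (proof-side model of A)
def VA (s t : List Char) : Nat → Nat → Int
  | 0, _ => 0
  | _+1, 0 => 0
  | i+1, j+1 =>
    let a := VA s t (i+1) j + pvWeight '-' (t.getD j ' ') pvMatrix
    let b := VA s t i (j+1) + pvWeight (s.getD i ' ') '-' pvMatrix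
    let c := VA s t i j + pvWeight (s.getD i ' ') (t.getD j ' ') pvMatrix
    let mv := if a > b then a else b
    let mv2 := if c > mv then c else mv
    if 0 > mv2 then 0 else mv2
  termination_by i j => (i, j)

-- the gapless diagonal recurrence that B's scan computes (proof-side model of B)
def VB (s t : List Char) : Nat → Nat → Int
  | 0, _ => 0
  | _+1, 0 => 0
  | i+1, j+1 => max 0 (VB s t i j + pvW (s.getD i ' ') (t.getD j ' '))

lemma singleton_infix (c : Char) (l : List Char) : [c] <:+: l ↔ c ∈ l := by
  constructor
  · intro h; exact h.subset (by simp)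
  · intro h
    obtain ⟨u, v, rfl⟩ := List.append_of_mem h
    exact ⟨u, v, by simp⟩

lemma pvFind_eq (c : Char) :
    PySem.Chars.find ['A','T','G','C','-'] [c] =
      if c = 'A' then 0 else if c = 'T' then 1 else if c = 'G' then 2
      else if c = 'C' then 3 else if c = '-' then 4 else -1 := by
  split_ifs with h1 h2 h3 h4 h5
  · subst h1; decide
  · subst h2; decide
  · subst h3; decide
  · subst h4; decide
  · subst h5; decide
  · rw [PySem.Chars.find_eq_neg_one_iff, singleton_infix]
    simp [h1, h2, h3, h4, h5]

lemma pvW_eq (a b : Char) :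
    pvW a b = if a ∈ (['A','T','G','C'] : List Char) ∧ b ∈ (['A','T','G','C'] : List Char)
      then (if a = b then 50 else 0) else -20000 := by
  unfold pvW
  simp only [PySem.Chars.isIn_iff_infix, singleton_infix]
  by_cases ha : a ∈ (['A','T','G','C'] : List Char) <;>
    by_cases hb : b ∈ (['A','T','G','C'] : List Char) <;> simp [ha, hb]

lemma pvW_gap_left (c : Char) : pvW '-' c = -20000 := by
  rw [pvW_eq]
  have h : ('-' : Char) ∉ (['A','T','G','C'] : List Char) := by decide
  simp [h]

lemma pvW_gap_right (c : Char) : pvW c '-' = -20000 := by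
  rw [pvW_eq]
  have h : ('-' : Char) ∉ (['A','T','G','C'] : List Char) := by decide
  simp [h]

lemma char5 (c : Char) :
    c = 'A' ∨ c = 'T' ∨ c = 'G' ∨ c = 'C' ∨ c = '-' ∨
      (c ≠ 'A' ∧ c ≠ 'T' ∧ c ≠ 'G' ∧ c ≠ 'C' ∧ c ≠ '-') := by
  tauto

lemma weight_eq (a b : Char) : pvWeight a b pvMatrix = pvW a b := by
  rcases char5 a with h | h | h | h | h | ⟨h1, h2, h3, h4, h5⟩ <;>
    rcases char5 b with g | g | g | g | g | ⟨g1, g2, g3, g4, g5⟩ <;>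
    simp only [pvWeight, pvW_eq, pvFind_eq] <;> simp_all <;> rfl

lemma pvW_le (a b : Char) : pvW a b ≤ 50 := by
  rw [pvW_eq]; split_ifs <;> omega

lemma if_gt_eq_max (a b : Int) : (if a > b then a else b) = max a b := by
  rcases le_total a b with h | h <;> simp [max_def] <;> omega

lemma if_lt_eq_max (a b : Int) : (if a < b then b else a) = max a b := by
  rcases le_total a b with h | h <;> simp [max_def] <;> omega

lemma VA_zero_left (s t : List Char) (j : Nat) : VA s t 0 j = 0 := by simp [VA]

lemma VA_zero_right (s t : List Char) (i : Nat) : VA s t i 0 = 0 := by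
  cases i <;> simp [VA]

lemma VB_zero_left (s t : List Char) (j : Nat) : VB s t 0 j = 0 := by simp [VB]

lemma VB_zero_right (s t : List Char) (i : Nat) : VB s t i 0 = 0 := by
  cases i <;> simp [VB]

-- combined invariant: 0 ≤ VB ≤ 50j, VB ≤ VA ≤ max VB (50j - 20000)
lemma pvInv (s t : List Char) : ∀ n i j, i + j ≤ n →
    0 ≤ VB s t i j ∧ VB s t i j ≤ 50 * (j : Int) ∧
    VB s t i j ≤ VA s t i j ∧
    VA s t i j ≤ max (VB s t i j) (50 * (j : Int) - 20000) := by
  intro n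
  induction n with
  | zero =>
    intro i j h
    have hi : i = 0 := by omega
    have hj : j = 0 := by omega
    subst hi; subst hj
    simp [VA, VB]
  | succ n ih =>
    intro i j h
    cases i with
    | zero =>
      simp only [VA_zero_left, VB_zero_left]
      constructor
      · omega
      constructor
      · positivity
      constructor
      · omega
      · simp only [le_max_iff]; left; omega
    | succ i =>
      cases j with
      | zero =>
        simp only [VA_zero_right, VB_zero_right]
        refine ⟨by omega, by omega, by omega, ?_⟩
        simp only [le_max_iff]; left; omega
      | succ j =>
        obtain ⟨h1a, h1b, h1c, h1d⟩ := ih (i+1) j (by omega)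
        obtain ⟨h2a, h2b, h2c, h2d⟩ := ih i (j+1) (by omega)
        obtain ⟨h3a, h3b, h3c, h3d⟩ := ih i j (by omega)
        have hw := pvW_le (s.getD i ' ') (t.getD j ' ')
        simp only [VA, VB, weight_eq, pvW_gap_left, pvW_gap_right, if_gt_eq_max]
        push_cast
        omega

-- ==== table correctness for A ====

def pvMat (s t : List Char) (f : Nat → Nat → Bool) : List (List Int) :=
  (List.range (s.length + 1)).map (fun i =>
    (List.range (t.length + 1)).map (fun j => if f i j then VA s t i j else 0))

lemma pvMat_congr (s t : List Char) (f g : Nat → Nat → Bool)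
    (h : ∀ i ≤ s.length, ∀ j ≤ t.length, f i j = g i j) :
    pvMat s t f = pvMat s t g := by
  unfold pvMat
  apply List.map_congr_left
  intro i hi
  apply List.map_congr_left
  intro j hj
  simp only [List.mem_range] at hi hj
  rw [h i (by omega) j (by omega)]

lemma pvGet2_mat (s t : List Char) (f : Nat → Nat → Bool) (i j : Nat)
    (hi : i ≤ s.length) (hj : j ≤ t.length) :
    pvGet2 (pvMat s t f) (i : Int) (j : Int) = if f i j then VA s t i j else 0 := by
  unfold pvGet2 pvMat
  simp only [PySem.List.pyGetD_natCast]
  rw [PySem.List.getD_map_range _ _ _ _ (by omega),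
      PySem.List.getD_map_range _ _ _ _ (by omega)]

lemma pvSet2_mat (s t : List Char) (f : Nat → Nat → Bool) (i j : Nat)
    (hi : i ≤ s.length) (hj : j ≤ t.length) (v : Int) (hv : v = VA s t i j) :
    pvSet2 (pvMat s t f) (i : Int) (j : Int) v =
      pvMat s t (fun k l => f k l || (k == i && l == j)) := by
  subst hv
  unfold pvSet2 pvMat
  simp only [PySem.List.pyGetD_natCast, PySem.List.pySetD_natCast]
  rw [PySem.List.getD_map_range _ _ _ _ (by omega)]
  apply List.ext_getElem
  · simp
  · intro k hk1 hk2
    have hk : k < s.length + 1 := by simpa using hk2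
    rw [List.getElem_set]
    split
    case isTrue hik =>
      subst hik
      rw [List.getElem_map, List.getElem_range]
      apply List.ext_getElem
      · simp
      · intro l hl1 hl2
        have hl : l < t.length + 1 := by simpa using hl2
        rw [List.getElem_set]
        split
        case isTrue hjl =>
          subst hjl
          simp
        case isFalse hjl =>
          have h1 : (l == j) = false := by
            simp only [beq_eq_false_iff_ne, ne_eq]
            exact fun hc => hjl hc.symm
          simp only [List.getElem_map, List.getElem_range, h1, Bool.and_false, Bool.or_false]
    case isFalse hik =>
      have h1 : (k == i) = false := by
        simp only [beq_eq_false_iff_ne, ne_eq]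
        exact fun hc => hik hc.symm
      simp only [List.getElem_map, List.getElem_range, h1, Bool.false_and, Bool.or_false]

-- the "processed so far" predicate: rows < i complete, row i complete before column j
def pvProc (i j : Nat) : Nat → Nat → Bool :=
  fun k l => decide (1 ≤ k) && decide (1 ≤ l) && (decide (k < i) || (k == i && decide (l < j)))

lemma pvProc_eq (I J k l : Nat) :
    pvProc I J k l = true ↔ (1 ≤ k ∧ 1 ≤ l ∧ (k < I ∨ (k = I ∧ l < J))) := by
  simp [pvProc, and_assoc]

lemma bool_eq_of_iff {a b : Bool} (h : a = true ↔ b = true) : a = b := by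
  cases a <;> cases b <;> simp_all

lemma pvDist_mat (s t : List Char) (i j : Nat) (hi : i + 1 ≤ s.length) (hj : j + 1 ≤ t.length) :
    pvDist ((i+1 : Nat) : Int) ((j+1 : Nat) : Int) (pvMat s t (pvProc (i+1) (j+1))) s t pvMatrix
      = VA s t (i+1) (j+1) := by
  have e1 : ((i+1 : Nat) : Int) - 1 = ((i : Nat) : Int) := by push_cast; ring
  have e2 : ((j+1 : Nat) : Int) - 1 = ((j : Nat) : Int) := by push_cast; ring
  have r1 : pvGet2 (pvMat s t (pvProc (i+1) (j+1))) ((i+1 : Nat) : Int) ((j : Nat) : Int)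
      = VA s t (i+1) j := by
    rw [pvGet2_mat s t _ (i+1) j (by omega) (by omega)]
    cases j with
    | zero => simp [VA_zero_right, pvProc_eq]
    | succ j' =>
      rw [if_pos]
      rw [pvProc_eq]
      omega
  have r2 : pvGet2 (pvMat s t (pvProc (i+1) (j+1))) ((i : Nat) : Int) ((j+1 : Nat) : Int)
      = VA s t i (j+1) := by
    rw [pvGet2_mat s t _ i (j+1) (by omega) (by omega)]
    cases i with
    | zero => simp [VA_zero_left, pvProc_eq]
    | succ i' =>
      rw [if_pos]
      rw [pvProc_eq]
      omega
  have r3 : pvGet2 (pvMat s t (pvProc (i+1) (j+1))) ((i : Nat) : Int) ((j : Nat) : Int)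
      = VA s t i j := by
    rw [pvGet2_mat s t _ i j (by omega) (by omega)]
    cases i with
    | zero => simp [VA_zero_left, pvProc_eq]
    | succ i' =>
      cases j with
      | zero => simp [VA_zero_right, pvProc_eq]
      | succ j' =>
        rw [if_pos]
        rw [pvProc_eq]
        omega
  simp only [pvDist, e1, e2, r1, r2, r3, PySem.List.pyGetD_natCast]
  conv_rhs => rw [VA]

lemma pvInner_loop (s t : List Char) (i : Nat) (hi1 : 1 ≤ i) (hi : i ≤ s.length) :
    ∀ J, 1 ≤ J → J ≤ t.length + 1 →
    (PySem.List.pyRange 1 (J : Int) 1).foldl (fun value j =>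
        pvSet2 value (i : Int) j (pvDist (i : Int) j value s t pvMatrix))
      (pvMat s t (pvProc i 1)) = pvMat s t (pvProc i J) := by
  intro J
  induction J with
  | zero => intro h; omega
  | succ J ihJ =>
    intro h1 h2
    by_cases hJ0 : J = 0
    · subst hJ0
      rw [show ((0+1 : Nat) : Int) = 1 by norm_num,
          show PySem.List.pyRange (1 : Int) 1 = [] from PySem.List.pyRange_one_eq_nil (by norm_num)]
      rfl
    · have hJ1 : 1 ≤ J := by omega
      rw [show ((J+1 : Nat) : Int) = (J : Int) + 1 by push_cast; ring,
          show PySem.List.pyRange (1 : Int) ((J : Int) + 1) =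
              PySem.List.pyRange (1 : Int) (J : Int) ++ [(J : Int)] from
            PySem.List.pyRange_one_succ_right (by exact_mod_cast hJ1),
          List.foldl_append, ihJ hJ1 (by omega)]
      simp only [List.foldl_cons, List.foldl_nil]
      obtain ⟨i', rfl⟩ : ∃ i', i = i' + 1 := ⟨i - 1, by omega⟩
      obtain ⟨J', rfl⟩ : ∃ J', J = J' + 1 := ⟨J - 1, by omega⟩
      rw [pvDist_mat s t i' J' (by omega) (by omega)]
      rw [pvSet2_mat s t _ (i'+1) (J'+1) (by omega) (by omega) _ rfl]
      apply pvMat_congr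
      intro k hk l hl
      apply bool_eq_of_iff
      simp only [Bool.or_eq_true, Bool.and_eq_true, beq_iff_eq, pvProc_eq]
      omega

lemma pvOuter_loop (s t : List Char) :
    ∀ N, 1 ≤ N → N ≤ s.length + 1 →
    (PySem.List.pyRange 1 (N : Int) 1).foldl (fun value i =>
        (PySem.List.pyRange 1 ((t.length : Int) + 1) 1).foldl (fun value j =>
          pvSet2 value i j (pvDist i j value s t pvMatrix)) value)
      (pvMat s t (pvProc 1 1)) = pvMat s t (pvProc N 1) := by
  intro N
  induction N with
  | zero => intro h; omega
  | succ N ihN =>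
    intro h1 h2
    by_cases hN0 : N = 0
    · subst hN0
      rw [show ((0+1 : Nat) : Int) = 1 by norm_num,
          show PySem.List.pyRange (1 : Int) 1 = [] from PySem.List.pyRange_one_eq_nil (by norm_num)]
      rfl
    · have hN1 : 1 ≤ N := by omega
      rw [show ((N+1 : Nat) : Int) = (N : Int) + 1 by push_cast; ring,
          show PySem.List.pyRange (1 : Int) ((N : Int) + 1) =
              PySem.List.pyRange (1 : Int) (N : Int) ++ [(N : Int)] from
            PySem.List.pyRange_one_succ_right (by exact_mod_cast hN1),
          List.foldl_append, ihN hN1 (by omega)]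
      simp only [List.foldl_cons, List.foldl_nil]
      have := pvInner_loop s t N hN1 (by omega) (t.length + 1) (by omega) (le_refl _)
      rw [show ((t.length + 1 : Nat) : Int) = (t.length : Int) + 1 by push_cast; ring] at this
      rw [this]
      apply pvMat_congr
      intro k hk l hl
      apply bool_eq_of_iff
      simp only [pvProc_eq]
      omega

-- generic fold helpers
lemma foldl_mono_le {α : Type} (h : Int → α → Int) (xs : List α)
    (hm : ∀ a x, x ∈ xs → a ≤ h a x) : ∀ a : Int, a ≤ xs.foldl h a := by
  induction xs with
  | nil => intro a; simp
  | cons x xs ih =>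
    intro a
    exact le_trans (hm a x (by simp)) (ih (fun a y hy => hm a y (by simp [hy])) (h a x))

lemma foldl_le_of_step_mem {α : Type} (h : Int → α → Int) (C : Int) (xs : List α)
    (hs : ∀ a x, x ∈ xs → a ≤ C → h a x ≤ C) : ∀ a : Int, a ≤ C → xs.foldl h a ≤ C := by
  induction xs with
  | nil => intro a ha; simpa using ha
  | cons x xs ih =>
    intro a ha
    exact ih (fun a y hy => hs a y (by simp [hy])) (h a x) (hs a x (by simp) ha)

lemma foldl_ge_elem {α : Type} (h : Int → α → Int) (xs : List α)
    (hm : ∀ a x, x ∈ xs → a ≤ h a x) (x : α) (hx : x ∈ xs) (a : Int) :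
    ∃ b, a ≤ b ∧ h b x ≤ xs.foldl h a := by
  obtain ⟨u, v, rfl⟩ := List.append_of_mem hx
  refine ⟨u.foldl h a, foldl_mono_le h u (fun a y hy => hm a y (by simp [hy])) a, ?_⟩
  rw [List.foldl_append, List.foldl_cons]
  exact foldl_mono_le h v (fun a y hy => hm a y (by simp [hy])) _

-- ==== the two sides' maxima ====

def pvMaxA (s t : List Char) : Int :=
  (List.range (s.length + 1)).foldl (fun mv i =>
    (List.range (t.length + 1)).foldl (fun mv j => max mv (VA s t i j)) mv) 0

lemma pvMaxA_nonneg (s t : List Char) : 0 ≤ pvMaxA s t := by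
  apply foldl_mono_le
  intro a x _
  apply foldl_mono_le
  intro a' y _
  exact le_max_left _ _

lemma le_pvMaxA (s t : List Char) (i j : Nat) (hi : i ≤ s.length) (hj : j ≤ t.length) :
    VA s t i j ≤ pvMaxA s t := by
  unfold pvMaxA
  obtain ⟨b, _, hle⟩ := foldl_ge_elem
    (fun mv i => (List.range (t.length + 1)).foldl (fun mv j => max mv (VA s t i j)) mv)
    (List.range (s.length + 1))
    (fun a x _ => foldl_mono_le _ _ (fun a' y _ => le_max_left _ _) a)
    i (by simp; omega) 0
  refine le_trans ?_ hle
  exact (PySem.List.le_foldl_max_int (List.range (t.length + 1)) (VA s t i) b).2 j (by simp; omega)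

-- B's inner diagonal scan
def pvStep (s t : List Char) (i0 j0 : Nat) : (Int × Int) → Nat → (Int × Int) :=
  fun vb k =>
    let v := max 0 (vb.1 + pvW (s.getD (i0 + k) ' ') (t.getD (j0 + k) ' '))
    (v, if v > vb.2 then v else vb.2)

def pvBest (s t : List Char) : Int :=
  ((List.range s.length).map (fun i => (i, 0)) ++
    (List.range (t.length - 1)).map (fun j => (0, j + 1))).foldl
    (fun (best : Int) (p : Nat × Nat) =>
      ((List.range (min (s.length - p.1) (t.length - p.2))).foldl
        (pvStep s t p.1 p.2) ((0 : Int), best)).2) 0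

lemma alt_eq_best (s t : String) :
    alignment_alt s t =
      if pvBest s.toList t.toList ≥ 50 * ((t.toList.length : Int) - 1)
      then (t.toList.length : Int) else -1 := rfl

lemma pvStep_succ (s t : List Char) (i0 j0 : Nat) (b0 : Int) (k : Nat) :
    (List.range (k+1)).foldl (pvStep s t i0 j0) (0, b0) =
      pvStep s t i0 j0 ((List.range k).foldl (pvStep s t i0 j0) (0, b0)) k := by
  rw [List.range_succ, List.foldl_append]
  simp

lemma pvStep_fst (s t : List Char) (i0 j0 : Nat) (h0 : i0 = 0 ∨ j0 = 0) (b0 : Int) :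
    ∀ k, ((List.range k).foldl (pvStep s t i0 j0) (0, b0)).1 = VB s t (i0 + k) (j0 + k) := by
  intro k
  induction k with
  | zero =>
    simp only [List.range_zero, List.foldl_nil]
    rcases h0 with h | h <;> subst h
    · rw [VB_zero_left]
    · rw [VB_zero_right]
  | succ k ih =>
    rw [pvStep_succ]
    show max 0 (_ + pvW _ _) = _
    rw [ih]
    rw [show i0 + (k+1) = (i0 + k) + 1 by omega, show j0 + (k+1) = (j0 + k) + 1 by omega]
    rfl

lemma pvStep_snd_step (s t : List Char) (i0 j0 : Nat) (b0 : Int) (k : Nat) :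
    ((List.range k).foldl (pvStep s t i0 j0) (0, b0)).2 ≤
      ((List.range (k+1)).foldl (pvStep s t i0 j0) (0, b0)).2 ∧
    ((List.range (k+1)).foldl (pvStep s t i0 j0) (0, b0)).1 ≤
      ((List.range (k+1)).foldl (pvStep s t i0 j0) (0, b0)).2 := by
  rw [pvStep_succ]
  unfold pvStep
  set g := (List.range k).foldl (pvStep s t i0 j0) (0, b0)
  set v := max 0 (g.1 + pvW (s.getD (i0 + k) ' ') (t.getD (j0 + k) ' '))
  simp only
  constructor
  · split_ifs <;> omega
  · split_ifs <;> omega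

lemma pvStep_snd_mono (s t : List Char) (i0 j0 : Nat) (b0 : Int) :
    ∀ k k', k' ≤ k →
      ((List.range k').foldl (pvStep s t i0 j0) (0, b0)).2 ≤
        ((List.range k).foldl (pvStep s t i0 j0) (0, b0)).2 := by
  intro k
  induction k with
  | zero => intro k' h; rw [Nat.le_zero.mp h]
  | succ k ih =>
    intro k' h
    rcases Nat.lt_or_ge k' (k+1) with h' | h'
    · exact le_trans (ih k' (by omega)) (pvStep_snd_step s t i0 j0 b0 k).1
    · rw [show k' = k + 1 by omega]

lemma pvStep_b0_le (s t : List Char) (i0 j0 : Nat) (b0 : Int) (k : Nat) :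
    b0 ≤ ((List.range k).foldl (pvStep s t i0 j0) (0, b0)).2 := by
  have := pvStep_snd_mono s t i0 j0 b0 k 0 (by omega)
  simpa using this

lemma pvStep_fst_le_snd (s t : List Char) (i0 j0 : Nat) (b0 : Int) (k : Nat) (hk : 1 ≤ k) :
    ((List.range k).foldl (pvStep s t i0 j0) (0, b0)).1 ≤
      ((List.range k).foldl (pvStep s t i0 j0) (0, b0)).2 := by
  obtain ⟨k', rfl⟩ : ∃ k', k = k' + 1 := ⟨k - 1, by omega⟩
  exact (pvStep_snd_step s t i0 j0 b0 k').2

lemma pvStep_fst_snd (s t : List Char) (i0 j0 : Nat) (vb : Int × Int) (k : Nat) :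
    (pvStep s t i0 j0 vb k).2 =
      if (pvStep s t i0 j0 vb k).1 > vb.2 then (pvStep s t i0 j0 vb k).1 else vb.2 := rfl

lemma pvStep_snd_le (s t : List Char) (i0 j0 : Nat) (b0 C : Int) (K : Nat)
    (hb : b0 ≤ C)
    (hcell : ∀ k ≤ K, ((List.range k).foldl (pvStep s t i0 j0) (0, b0)).1 ≤ C) :
    ∀ k ≤ K, ((List.range k).foldl (pvStep s t i0 j0) (0, b0)).2 ≤ C := by
  intro k
  induction k with
  | zero => intro _; simpa using hb
  | succ k ih =>
    intro hk
    have h1 := ih (by omega)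
    have h2 := hcell (k+1) hk
    rw [pvStep_succ] at h2 ⊢
    rw [pvStep_fst_snd]
    split_ifs <;> omega

lemma pvBest_nonneg (s t : List Char) : 0 ≤ pvBest s t := by
  apply foldl_mono_le
  intro a p _
  exact pvStep_b0_le s t p.1 p.2 a _

lemma le_pvBest (s t : List Char) (i j : Nat) (hi : i ≤ s.length) (hj : j ≤ t.length) :
    VB s t i j ≤ pvBest s t := by
  rcases Nat.eq_zero_or_pos i with hi0 | hi1
  · subst hi0; rw [VB_zero_left]; exact pvBest_nonneg s t
  rcases Nat.eq_zero_or_pos j with hj0 | hj1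
  · subst hj0; rw [VB_zero_right]; exact pvBest_nonneg s t
  -- the start of (i, j)'s diagonal
  set d := min i j with hd
  set i0 := i - d with hi0d
  set j0 := j - d with hj0d
  have h0 : i0 = 0 ∨ j0 = 0 := by omega
  have hmem : (i0, j0) ∈ (List.range s.length).map (fun i => (i, 0)) ++
      (List.range (t.length - 1)).map (fun j => (0, j + 1)) := by
    rcases Nat.lt_or_ge i j with hij | hji
    case inr =>
      apply List.mem_append_left
      have : j0 = 0 := by omega
      rw [this]
      exact List.mem_map_of_mem (List.mem_range.mpr (by omega))
    case inl =>
      apply List.mem_append_right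
      have hii0 : i0 = 0 := by omega
      have : (i0, j0) = ((0 : Nat), (j0 - 1) + 1) := by
        rw [hii0]; congr 1; omega
      rw [this]
      exact List.mem_map_of_mem (List.mem_range.mpr (by omega))
  unfold pvBest
  obtain ⟨b, _, hle⟩ := foldl_ge_elem _ _
    (fun a p _ => pvStep_b0_le s t p.1 p.2 a _) (i0, j0) hmem 0
  refine le_trans ?_ hle
  have hfst := pvStep_fst s t i0 j0 h0 b d
  have hd_le : d ≤ min (s.length - i0) (t.length - j0) := by omega
  calc VB s t i j = ((List.range d).foldl (pvStep s t i0 j0) (0, b)).1 := by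
        rw [hfst, show i0 + d = i by omega, show j0 + d = j by omega]
    _ ≤ ((List.range d).foldl (pvStep s t i0 j0) (0, b)).2 :=
        pvStep_fst_le_snd s t i0 j0 b d (by omega)
    _ ≤ ((List.range (min (s.length - (i0, j0).1) (t.length - (i0, j0).2))).foldl
          (pvStep s t (i0, j0).1 (i0, j0).2) (0, b)).2 :=
        pvStep_snd_mono s t i0 j0 b _ d (by omega)

lemma pvStarts_bound (s t : List Char) (p : Nat × Nat)
    (hp : p ∈ (List.range s.length).map (fun i => (i, 0)) ++
      (List.range (t.length - 1)).map (fun j => (0, j + 1))) :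
    (p.1 = 0 ∨ p.2 = 0) ∧ p.1 ≤ s.length ∧ p.2 ≤ t.length := by
  rcases List.mem_append.mp hp with h | h <;>
    obtain ⟨x, hx, rfl⟩ := List.mem_map.mp h <;> simp only [List.mem_range] at hx
  · exact ⟨Or.inr rfl, by omega, by omega⟩
  · exact ⟨Or.inl rfl, by omega, by omega⟩

lemma pvBest_le_maxA (s t : List Char) : pvBest s t ≤ pvMaxA s t := by
  unfold pvBest
  apply foldl_le_of_step_mem _ _ _ ?_ 0 (pvMaxA_nonneg s t)
  intro a p hp ha
  obtain ⟨h0, hp1, hp2⟩ := pvStarts_bound s t p hp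
  apply pvStep_snd_le s t p.1 p.2 a (pvMaxA s t) _ ha _ _ (le_refl _)
  intro k hk
  rw [pvStep_fst s t p.1 p.2 h0 a k]
  have hb1 : p.1 + k ≤ s.length := by omega
  have hb2 : p.2 + k ≤ t.length := by omega
  exact le_trans (pvInv s t (p.1 + k + (p.2 + k)) (p.1 + k) (p.2 + k) (le_refl _)).2.2.1
    (le_pvMaxA s t (p.1 + k) (p.2 + k) hb1 hb2)

lemma pvMaxA_le (s t : List Char) :
    pvMaxA s t ≤ max (pvBest s t) (50 * (t.length : Int) - 20000) := by
  unfold pvMaxA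
  apply foldl_le_of_step_mem _ _ _ ?_ 0 (le_max_of_le_left (pvBest_nonneg s t))
  intro a i hi ha
  apply foldl_le_of_step_mem _ _ _ ?_ a ha
  intro a' j hj ha'
  simp only [List.mem_range] at hi hj
  have h1 := (pvInv s t (i + j) i j (le_refl _)).2.2.2
  have h2 := (pvInv s t (i + j) i j (le_refl _)).2.1
  have h3 := le_pvBest s t i j (by omega) (by omega)
  have h4 : (j : Int) ≤ (t.length : Int) := by exact_mod_cast Nat.le_of_lt_succ hj
  omega

-- ==== assembling A's side ====

lemma pvInit (s t : List Char) :
    (PySem.List.pyRange 0 ((s.length : Int) + 1) 1).map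
      (fun _ => (PySem.List.pyRange 0 ((t.length : Int) + 1) 1).map (fun _ => (0 : Int)))
      = pvMat s t (pvProc 1 1) := by
  rw [show ((s.length : Int) + 1) = ((s.length + 1 : Nat) : Int) by push_cast; ring,
      show ((t.length : Int) + 1) = ((t.length + 1 : Nat) : Int) by push_cast; ring,
      PySem.List.pyRange_zero_natCast, PySem.List.pyRange_zero_natCast]
  unfold pvMat
  rw [List.map_map, List.map_map]
  apply List.map_congr_left
  intro i hi
  apply List.map_congr_left
  intro j hj
  simp only [Function.comp]
  have : pvProc 1 1 i j = false := by
    by_contra hc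
    have := (pvProc_eq 1 1 i j).mp (by revert hc; cases pvProc 1 1 i j <;> simp)
    omega
  simp [this]

lemma pvMaxpass (s t : List Char) :
    (PySem.List.pyRange 0 ((s.length : Int) + 1) 1).foldl (fun mv i =>
      (PySem.List.pyRange 0 ((t.length : Int) + 1) 1).foldl (fun mv j =>
        if mv < pvGet2 (pvMat s t (pvProc (s.length + 1) 1)) i j
        then pvGet2 (pvMat s t (pvProc (s.length + 1) 1)) i j else mv) mv) 0
      = pvMaxA s t := by
  rw [show ((s.length : Int) + 1) = ((s.length + 1 : Nat) : Int) by push_cast; ring,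
      show ((t.length : Int) + 1) = ((t.length + 1 : Nat) : Int) by push_cast; ring,
      PySem.List.pyRange_zero_natCast, PySem.List.pyRange_zero_natCast,
      List.foldl_map]
  unfold pvMaxA
  apply PySem.List.foldl_congr_mem
  intro mv i hi
  rw [List.foldl_map]
  apply PySem.List.foldl_congr_mem
  intro mv' j hj
  simp only [List.mem_range] at hi hj
  rw [pvGet2_mat s t _ i j (by omega) (by omega)]
  have hcell : (if pvProc (s.length + 1) 1 i j then VA s t i j else 0) = VA s t i j := by
    rcases Nat.eq_zero_or_pos i with h | h
    · subst h; simp [VA_zero_left]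
    rcases Nat.eq_zero_or_pos j with h' | h'
    · subst h'; simp [VA_zero_right]
    · rw [if_pos]; rw [pvProc_eq]; omega
  rw [hcell, if_lt_eq_max]

lemma alignment_eq_maxA (s t : String) :
    alignment s t =
      if pvMaxA s.toList t.toList < 50 * ((t.toList.length : Int) - 1)
      then -1 else (t.toList.length : Int) := by
  simp only [alignment, PySem.Str.len_eq]
  rw [pvInit s.toList t.toList]
  have houter := pvOuter_loop s.toList t.toList (s.toList.length + 1) (by omega) (le_refl _)
  rw [show ((s.toList.length + 1 : Nat) : Int) = (s.toList.length : Int) + 1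
      by push_cast; ring] at houter
  rw [houter, pvMaxpass]

-- ===== VERDICT (by name: the statement is the Claim_ definition above) =====
theorem alignment_spec : Claim_equal_alignment := by
  unfold Claim_equal_alignment
  intro s t _
  unfold Spec_alignment
  rw [alignment_eq_maxA, alt_eq_best]
  have h1 : pvBest s.toList t.toList ≤ pvMaxA s.toList t.toList := pvBest_le_maxA _ _
  have h2 := pvMaxA_le s.toList t.toList
  split_ifs <;> omega
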